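-- pv_equiv track=rewrite | github.com/yueJDy/pwn | 2020/TJCTF/7_naughty_solve.py | exploitFS
-- ===== SOURCE A (Python) =====
-- def exploitFS(s, start, index, strformat):
-- 	str1 = ""
-- 	buf = ""
-- 	for i in s[::-1]:
-- 		if i == 'x':
-- 			break
-- 		str1 += i
-- 	if len(str1)%2 != 0:
-- 		str1 += '0'
-- 	l = int(len(str1) /2)
-- 	for i in range(l):
-- 		tmp = str1[i*2 +1] + str1[i*2]
-- 		tmp2 = int(tmp, 16)
-- 		if tmp2 < start:
-- 			offset = tmp2 + 256  - start
-- 			start = tmp2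
-- 		else:
-- 			offset = tmp2 -start
-- 			start = tmp2
-- 		buf += '%' + str(offset) + 'x%' + str(index + i) + '$' + strformat
--
-- 	return buf, start
-- ===== SOURCE B (Python) =====
-- def exploitFS(s, start, index, strformat):
--     # Parse the hex tail (chars after the last 'x') as ONE big integer, then peel
--     # its bytes off with & 255 / >> 8 -- no string reversal, no per-pair slicing.
--     h = s.rpartition('x')[2]
--     if not h:
--         return "", start
--     val = int(h, 16)
--     buf = ""
--     for i in range((len(h) + 1) // 2):
--         b = val & 255
--         val >>= 8
--         offset = b + 256 - start if b < start else b - start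
--         buf += '%' + str(offset) + 'x%' + str(index + i) + '$' + strformat
--         start = b
--     return buf, start
-- ===== Notes on version B (the rewrite author's own statement) =====
-- stated objective: alternative
-- what changed: Instead of reversing the tail and slicing two characters per byte, B parses the whole hex tail once as a single arbitrary-precision integer and peels its bytes off with & 255 / >>= 8, emitting each offset in the same pass.
-- outside the precondition, e.g. on exploitFS('x1+f', 0, 1, 'n'): A returns ('%15x%1$n%242x%2$n', 1), B raises ValueError
import Mathlib
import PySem

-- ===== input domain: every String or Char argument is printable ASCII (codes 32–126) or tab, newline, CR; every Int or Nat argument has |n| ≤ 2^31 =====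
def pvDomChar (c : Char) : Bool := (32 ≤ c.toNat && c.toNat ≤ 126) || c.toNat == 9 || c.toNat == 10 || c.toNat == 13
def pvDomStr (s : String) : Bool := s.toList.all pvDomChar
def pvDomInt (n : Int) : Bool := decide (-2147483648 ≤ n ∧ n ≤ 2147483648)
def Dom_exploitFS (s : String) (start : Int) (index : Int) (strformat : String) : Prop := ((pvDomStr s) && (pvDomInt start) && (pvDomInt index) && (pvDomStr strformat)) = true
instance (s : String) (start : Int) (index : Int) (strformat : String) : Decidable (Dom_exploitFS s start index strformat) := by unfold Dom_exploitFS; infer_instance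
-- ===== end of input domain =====

-- B parses the whole hex tail once as one big integer and peels bytes off with &255 / >>8,
-- instead of A's reverse-the-string-and-slice-two-chars-per-byte loop (objective: alternative, same cost).

-- hex digit value; exact for int(·, 16) on pure hex digits (Pre_ restricts to that)
def pvHexVal (c : Char) : Nat :=
  if '0' ≤ c ∧ c ≤ '9' then c.toNat - 48
  else if 'a' ≤ c ∧ c ≤ 'f' then c.toNat - 87
  else if 'A' ≤ c ∧ c ≤ 'F' then c.toNat - 55
  else 0

-- ===== PORT A =====
-- 'for i in s[::-1]: if i == 'x': break; str1 += i'
def pvATake : List Char → List Char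
  | [] => []
  | c :: rest => if c = 'x' then [] else c :: pvATake rest

-- int(str1[i*2+1] + str1[i*2], 16): exact on Pre_ (both chars hex digits)
def pvPairVal (str1 : List Char) (i : Nat) : Nat :=
  16 * pvHexVal (str1.getD (i * 2 + 1) '0') + pvHexVal (str1.getD (i * 2) '0')

-- the indexed loop 'for i in range(l)' carrying (buf, start)
def pvALoop (str1 : List Char) (index : Int) (strformat : String) (l : Nat) :
    Nat → String → Int → String × Int
  | i, buf, start =>
    if h : i < l then
      let tmp2 : Int := (pvPairVal str1 i : Int)
      let offset := if tmp2 < start then tmp2 + 256 - start else tmp2 - start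
      pvALoop str1 index strformat l (i + 1)
        (buf ++ "%" ++ PySem.Int.toStr offset ++ "x%" ++ PySem.Int.toStr (index + (i : Int)) ++ "$" ++ strformat)
        tmp2
    else (buf, start)
  termination_by i => l - i

def exploitFS (s : String) (start : Int) (index : Int) (strformat : String) : String × Int :=
  let str1 := pvATake s.toList.reverse
  let str1 := if str1.length % 2 ≠ 0 then str1 ++ ['0'] else str1
  let l := str1.length / 2   -- int(len(str1)/2): exact, length is even here
  pvALoop str1 index strformat l 0 "" start

-- ===== PORT B =====
-- int(h, 16): exact when h is pure hex digits (Pre_)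
def pvHexNat (h : List Char) : Nat := h.foldl (fun a c => 16 * a + pvHexVal c) 0

-- the loop 'for i in range((len(h)+1)//2)' carrying (val, start, buf); val ≥ 0 always,
-- so 'val & 255' is 'val % 256' and 'val >>= 8' is 'val / 256' on Nat (exact)
def pvBLoop (index : Int) (strformat : String) : Nat → Nat → Nat → Int → String → String × Int
  | 0, _, _, start, buf => (buf, start)
  | n + 1, i, val, start, buf =>
    let b : Nat := val % 256
    let offset : Int := if (b : Int) < start then (b : Int) + 256 - start else (b : Int) - start
    pvBLoop index strformat n (i + 1) (val / 256) (b : Int)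
      (buf ++ "%" ++ PySem.Int.toStr offset ++ "x%" ++ PySem.Int.toStr (index + (i : Int)) ++ "$" ++ strformat)

def exploitFS_alt (s : String) (start : Int) (index : Int) (strformat : String) : String × Int :=
  -- s.rpartition('x')[2]: the chars after the last 'x' (the whole string if none)
  let h := (s.toList.reverse.takeWhile (· ≠ 'x')).reverse
  if h.isEmpty then ("", start)
  else pvBLoop index strformat ((h.length + 1) / 2) 0 (pvHexNat h) start ""

-- ===== PRECONDITION & SPEC =====
-- Pre_ excludes inputs whose hex tail (the chars after the last 'x') contains a non-hex-digit
-- character: there A's pairwise int(tmp, 16) usually raises ValueError, and on the rare pairs it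
-- still accepts (an embedded sign or space, e.g. tail '1+f') B's whole-tail int(h, 16) raises,
-- so no common value exists; the ports are exact on pure hex digits.
def Pre_exploitFS (s : String) (start : Int) (index : Int) (strformat : String) : Prop :=
  ((s.toList.reverse.takeWhile (· ≠ 'x')).all
    (fun c => c.isDigit || ('a' ≤ c && c ≤ 'f') || ('A' ≤ c && c ≤ 'F'))) = true
instance (s : String) (start : Int) (index : Int) (strformat : String) : Decidable (Pre_exploitFS s start index strformat) := by unfold Pre_exploitFS; infer_instance

def pvWitness_exploitFS : String × Int × Int × String := ("0x4142", 0, 1, "n")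

def Spec_exploitFS (s : String) (start : Int) (index : Int) (strformat : String) (out : String × Int) : Prop := out = exploitFS_alt s start index strformat
instance (s : String) (start : Int) (index : Int) (strformat : String) (out : String × Int) : Decidable (Spec_exploitFS s start index strformat out) := by unfold Spec_exploitFS; infer_instance

-- ===== CLAIM (what is proved, stated in full; the proofs are below) =====
def Claim_equal_exploitFS : Prop := ∀ (s : String) (start : Int) (index : Int) (strformat : String), Dom_exploitFS s start index strformat → Pre_exploitFS s start index strformat → Spec_exploitFS s start index strformat (exploitFS s start index strformat)

-- ===== LEMMAS AND PROOFS =====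

-- generic emitter over a precomputed list of byte values (proof-only skeleton both loops reduce to)
def pvEmit (index : Int) (strformat : String) : List Nat → Nat → Int → String → String × Int
  | [], _, start, buf => (buf, start)
  | v :: rest, i, start, buf =>
    pvEmit index strformat rest (i + 1) (v : Int)
      (buf ++ "%" ++ PySem.Int.toStr (if (v : Int) < start then (v : Int) + 256 - start else (v : Int) - start)
           ++ "x%" ++ PySem.Int.toStr (index + (i : Int)) ++ "$" ++ strformat)

-- little-endian bytes of a Nat, n of them
def pvBytesLE : Nat → Nat → List Nat
  | 0, _ => []
  | n + 1, v => (v % 256) :: pvBytesLE n (v / 256)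

theorem pvATake_eq_takeWhile (l : List Char) : pvATake l = l.takeWhile (· ≠ 'x') := by
  induction l with
  | nil => rfl
  | cons c rest ih =>
      simp only [pvATake, List.takeWhile]
      by_cases h : c = 'x' <;> simp [h, ih]

theorem pvHexVal_lt (c : Char) : pvHexVal c < 16 := by
  unfold pvHexVal
  split_ifs with h1 h2 h3
  · obtain ⟨ha, hb⟩ := h1
    simp only [Char.le_def, UInt32.le_iff_toNat_le] at ha hb
    rw [show '0'.val.toNat = 48 from rfl] at ha
    rw [show '9'.val.toNat = 57 from rfl] at hb
    show c.val.toNat - 48 < 16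
    omega
  · obtain ⟨ha, hb⟩ := h2
    simp only [Char.le_def, UInt32.le_iff_toNat_le] at ha hb
    rw [show 'a'.val.toNat = 97 from rfl] at ha
    rw [show 'f'.val.toNat = 102 from rfl] at hb
    show c.val.toNat - 87 < 16
    omega
  · obtain ⟨ha, hb⟩ := h3
    simp only [Char.le_def, UInt32.le_iff_toNat_le] at ha hb
    rw [show 'A'.val.toNat = 65 from rfl] at ha
    rw [show 'F'.val.toNat = 70 from rfl] at hb
    show c.val.toNat - 55 < 16
    omega
  · omega

theorem pvBLoop_eq_emit (index : Int) (strformat : String) :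
    ∀ (n i val : Nat) (start : Int) (buf : String),
      pvBLoop index strformat n i val start buf
        = pvEmit index strformat (pvBytesLE n val) i start buf := by
  intro n
  induction n with
  | zero => intro i val start buf; rfl
  | succ n ih => intro i val start buf; rw [pvBLoop, pvBytesLE, pvEmit, ih]

theorem pvALoop_eq_emit (str1 : List Char) (index : Int) (strformat : String) (l : Nat) :
    ∀ (k i : Nat) (buf : String) (start : Int), i + k = l →
      pvALoop str1 index strformat l i buf start
        = pvEmit index strformat ((List.range' i k).map (pvPairVal str1)) i start buf := by
  intro k
  induction k with
  | zero =>
      intro i buf start hil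
      rw [pvALoop, dif_neg (by omega : ¬ i < l)]
      rfl
  | succ k ih =>
      intro i buf start hil
      rw [pvALoop, dif_pos (by omega : i < l), List.range'_succ, List.map_cons, pvEmit,
        ih (i + 1) _ _ (by omega)]

theorem pvPairVal_shift (c1 c2 : Char) (rest : List Char) (j : Nat) :
    pvPairVal (c1 :: c2 :: rest) (j + 1) = pvPairVal rest j := by
  unfold pvPairVal
  have h1 : (j + 1) * 2 + 1 = (j * 2 + 1) + 2 := by ring
  have h2 : (j + 1) * 2 = j * 2 + 2 := by ring
  rw [h1, h2]
  rfl

theorem pvBytesLE_core :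
    ∀ (n : Nat) (str1 : List Char), str1.length = 2 * n →
      (List.range' 0 n).map (pvPairVal str1) = pvBytesLE n (pvHexNat str1.reverse) := by
  intro n
  induction n with
  | zero => intro str1 h; simp [pvBytesLE]
  | succ n ih =>
      intro str1 h
      match str1 with
      | c1 :: c2 :: rest =>
        have hrest : rest.length = 2 * n := by simp at h; omega
        have hrev : (c1 :: c2 :: rest).reverse = rest.reverse ++ [c2, c1] := by simp
        have hval : pvHexNat (c1 :: c2 :: rest).reverse
            = 256 * pvHexNat rest.reverse + (16 * pvHexVal c2 + pvHexVal c1) := by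
          rw [hrev]; unfold pvHexNat; rw [List.foldl_append]; simp [List.foldl]; ring
        have hb : 16 * pvHexVal c2 + pvHexVal c1 < 256 := by
          have := pvHexVal_lt c2; have := pvHexVal_lt c1; omega
        have hmod : pvHexNat (c1 :: c2 :: rest).reverse % 256 = 16 * pvHexVal c2 + pvHexVal c1 := by
          rw [hval]; omega
        have hdiv : pvHexNat (c1 :: c2 :: rest).reverse / 256 = pvHexNat rest.reverse := by
          rw [hval]; omega
        have hzero : pvPairVal (c1 :: c2 :: rest) 0 = 16 * pvHexVal c2 + pvHexVal c1 := rfl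
        rw [pvBytesLE, hmod, hdiv, ← ih rest hrest]
        have hrange : List.range' 0 (n + 1) = 0 :: List.range' 1 n := by
          rw [List.range'_succ]
        rw [hrange, List.map_cons, hzero]
        congr 1
        have : List.range' 1 n = (List.range' 0 n).map (· + 1) := by
          rw [List.range'_eq_map_range, List.range'_eq_map_range, List.map_map]
          apply List.map_congr_left; intro a _; simp [Nat.add_comm]
        rw [this, List.map_map]
        apply List.map_congr_left
        intro j _
        exact pvPairVal_shift c1 c2 rest j

-- a leading '0' does not change the parsed value
theorem pvHexNat_cons_zero (h : List Char) : pvHexNat ('0' :: h) = pvHexNat h := by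
  unfold pvHexNat
  simp [List.foldl, pvHexVal]

-- the two branches of the padding 'if', proved at the list level
theorem exploit_core (t : List Char) (start index : Int) (strformat : String) :
    pvALoop (if t.length % 2 ≠ 0 then t ++ ['0'] else t) index strformat
      ((if t.length % 2 ≠ 0 then t ++ ['0'] else t).length / 2) 0 "" start
    = (if (t.reverse).isEmpty then ("", start)
       else pvBLoop index strformat ((t.reverse.length + 1) / 2) 0 (pvHexNat t.reverse) start "") := by
  by_cases hemp : t = []
  · subst hemp
    simp only [List.length_nil, List.reverse_nil, List.isEmpty_nil, if_true]
    norm_num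
    rw [pvALoop, dif_neg (by simp)]
  · have hne : (t.reverse).isEmpty = false := by simp [hemp]
    rw [hne]
    simp only [Bool.false_eq_true, if_false]
    by_cases hodd : t.length % 2 = 0
    · rw [if_neg (by omega)]
      have hn : (t.reverse.length + 1) / 2 = t.length / 2 := by simp; omega
      rw [hn, pvALoop_eq_emit t index strformat _ (t.length / 2) 0 "" start (by omega),
          pvBLoop_eq_emit, ← pvBytesLE_core (t.length / 2) t (by omega)]
    · rw [if_pos (by omega)]
      have hn : (t.reverse.length + 1) / 2 = (t ++ ['0']).length / 2 := by simp
      have hv : pvHexNat t.reverse = pvHexNat ((t ++ ['0']).reverse) := by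
        rw [List.reverse_append]
        exact (pvHexNat_cons_zero t.reverse).symm
      rw [hn, hv,
          pvALoop_eq_emit (t ++ ['0']) index strformat ((t ++ ['0']).length / 2)
            ((t ++ ['0']).length / 2) 0 "" start (by omega),
          pvBLoop_eq_emit,
          ← pvBytesLE_core ((t ++ ['0']).length / 2) (t ++ ['0']) (by simp; omega)]

-- ===== VERDICT (by name: the statement is the Claim_ definition above) =====
theorem exploitFS_spec : Claim_equal_exploitFS := by
  intro s start index strformat _ _
  unfold Spec_exploitFS exploitFS exploitFS_alt
  rw [pvATake_eq_takeWhile]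
  exact exploit_core (s.toList.reverse.takeWhile (· ≠ 'x')) start index strformat
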